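-- pv_equiv track=rewrite | github.com/labedufn/categoriza-categorizabrasil-sistema | nutricao/avaliacao/views.py | verifica_eliminacao
-- ===== SOURCE A (Python) =====
-- def verifica_eliminacao(respostas,variavel_controle):
--
--     for resposta in respostas.items():
--             if resposta[1] == 'IN':
--                 if variavel_controle == False:
--                     variavel_controle = True
--                 else:
--                      variavel_controle = False
--
--     return variavel_controle
-- ===== SOURCE B (Python) =====
-- def verifica_eliminacao(respostas, variavel_controle):
--     count = sum(1 for v in respostas.values() if v == 'IN')
--     if count == 0:
--         return variavel_controle
--     return variavel_controle != (count % 2 == 1)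
-- ===== Notes on version B (the rewrite author's own statement) =====
-- stated objective: simpler
-- what changed: Replaces the per-item boolean toggling loop with a single tally of 'IN' values followed by a parity (xor) computation; when no 'IN' occurs the input is returned untouched, as in A.
import Mathlib
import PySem

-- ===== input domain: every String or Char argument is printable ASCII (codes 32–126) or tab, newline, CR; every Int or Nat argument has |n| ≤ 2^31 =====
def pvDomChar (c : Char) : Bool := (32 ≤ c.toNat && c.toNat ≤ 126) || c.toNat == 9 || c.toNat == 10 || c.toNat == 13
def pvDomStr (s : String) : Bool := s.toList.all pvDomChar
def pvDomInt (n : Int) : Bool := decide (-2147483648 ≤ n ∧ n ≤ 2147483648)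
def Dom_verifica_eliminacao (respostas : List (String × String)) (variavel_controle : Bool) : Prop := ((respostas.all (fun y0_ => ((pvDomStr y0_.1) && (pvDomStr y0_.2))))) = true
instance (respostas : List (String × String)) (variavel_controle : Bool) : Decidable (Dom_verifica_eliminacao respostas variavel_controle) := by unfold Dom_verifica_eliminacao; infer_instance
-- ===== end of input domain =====

-- B replaces the per-item boolean toggling with a tally of 'IN' values followed by a parity computation (objective: simpler).
-- ===== PORT A =====
def verifica_eliminacao (respostas : List (String × String)) (variavel_controle : Bool) : Bool :=
  respostas.foldl (fun variavel_controle resposta =>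
    if resposta.2 == "IN" then
      (if variavel_controle == false then true else false)
    else variavel_controle) variavel_controle

-- ===== PORT B =====
def verifica_eliminacao_alt (respostas : List (String × String)) (variavel_controle : Bool) : Bool :=
  let count := (respostas.filter (fun p => p.2 == "IN")).length
  if count = 0 then variavel_controle
  else variavel_controle != decide (count % 2 = 1)

-- ===== PRECONDITION & SPEC =====
def Spec_verifica_eliminacao (respostas : List (String × String)) (variavel_controle : Bool) (out : Bool) : Prop := out = verifica_eliminacao_alt respostas variavel_controle
instance (respostas : List (String × String)) (variavel_controle : Bool) (out : Bool) : Decidable (Spec_verifica_eliminacao respostas variavel_controle out) := by unfold Spec_verifica_eliminacao; infer_instance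

-- ===== CLAIM (what is proved, stated in full; the proofs are below) =====
def Claim_equal_verifica_eliminacao : Prop := ∀ (respostas : List (String × String)) (variavel_controle : Bool), Dom_verifica_eliminacao respostas variavel_controle → Spec_verifica_eliminacao respostas variavel_controle (verifica_eliminacao respostas variavel_controle)

-- ===== LEMMAS AND PROOFS =====

-- ===== VERDICT (by name: the statement is the Claim_ definition above) =====
theorem toggle_foldl (respostas : List (String × String)) (vc : Bool) :
    verifica_eliminacao respostas vc
      = (vc != decide ((respostas.filter (fun p => p.2 == "IN")).length % 2 = 1)) := by
  induction respostas generalizing vc with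
  | nil => simp [verifica_eliminacao]
  | cons h t ih =>
    simp only [verifica_eliminacao] at ih ⊢
    rw [List.foldl_cons, List.filter_cons]
    by_cases hin : (h.2 == "IN") = true
    · simp only [hin, if_pos, List.length_cons]
      rw [ih]
      have : (t.filter (fun p => p.2 == "IN")).length % 2 = 0
          ∨ (t.filter (fun p => p.2 == "IN")).length % 2 = 1 := Nat.mod_two_eq_zero_or_one _
      cases vc <;> rcases this with h2 | h2 <;>
        simp [h2, Nat.succ_mod_two_eq_one_iff, Nat.succ_mod_two_eq_zero_iff]
    · simp only [hin, if_neg, Bool.false_eq_true, ite_false]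
      exact ih vc

theorem verifica_eliminacao_spec : Claim_equal_verifica_eliminacao := by
  intro respostas vc _
  unfold Spec_verifica_eliminacao verifica_eliminacao_alt
  rw [toggle_foldl]
  by_cases h0 : (respostas.filter (fun p => p.2 == "IN")).length = 0
  · simp [h0]
  · simp [h0]
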